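-- pv_equiv track=rewrite | github.com/algoscale1/slm | slm/app/preprocessing/score_calculator.py | get_common_tokens
-- ===== SOURCE A (Python) =====
-- def get_common_tokens(list1, list2):
--     """
--     calculates intersection of two list of words
--     :param list1: list of words
--     :param list2: list of words
--     :return: lenght of common words
--     """
--     list2 = [word for word in list2]
--     l1 = []
--     l2 = []
--     for word in list1:
--         l1.append(word)
--     for word in list2:
--         l2.append(word)
--     sim = len(set(l1).intersection(l2))
--     return sim
-- ===== SOURCE B (Python) =====
-- def get_common_tokens(list1, list2):
--     """Sort copies of both lists, then count distinct common words with a two-pointer merge walk."""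
--     a = sorted(list1)
--     b = sorted(list2)
--     i = 0
--     j = 0
--     sim = 0
--     while i < len(a) and j < len(b):
--         if a[i] < b[j]:
--             i += 1
--         elif b[j] < a[i]:
--             j += 1
--         else:
--             v = a[i]
--             sim += 1
--             while i < len(a) and a[i] == v:
--                 i += 1
--             while j < len(b) and b[j] == v:
--                 j += 1
--     return sim
-- ===== Notes on version B (the rewrite author's own statement) =====
-- stated objective: alternative
-- what changed: Replaces A's hash-set construction and set.intersection with sorting both lists and a two-pointer merge walk that counts each distinct common word once.
import Mathlib
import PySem

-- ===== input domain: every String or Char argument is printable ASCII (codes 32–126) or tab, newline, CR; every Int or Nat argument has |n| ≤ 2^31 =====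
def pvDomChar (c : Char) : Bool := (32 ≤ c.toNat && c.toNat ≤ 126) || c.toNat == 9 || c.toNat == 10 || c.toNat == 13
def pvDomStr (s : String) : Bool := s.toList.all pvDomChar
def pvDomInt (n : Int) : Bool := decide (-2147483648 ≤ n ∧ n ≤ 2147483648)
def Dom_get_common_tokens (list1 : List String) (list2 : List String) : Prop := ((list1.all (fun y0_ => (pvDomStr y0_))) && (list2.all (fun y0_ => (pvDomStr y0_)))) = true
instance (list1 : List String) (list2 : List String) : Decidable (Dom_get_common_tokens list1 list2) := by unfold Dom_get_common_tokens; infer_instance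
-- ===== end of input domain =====

-- B replaces A's set.intersection with sorting both lists and a two-pointer merge walk
-- counting each distinct common word once (alternative algorithm, same result).


-- ===== PORT A =====
def get_common_tokens (list1 : List String) (list2 : List String) : Int :=
  let list2' := list2.map (fun word => word)          -- list2 = [word for word in list2]
  let l1 := list1.foldl (fun acc word => acc ++ [word]) []   -- for word in list1: l1.append(word)
  let l2 := list2'.foldl (fun acc word => acc ++ [word]) []  -- for word in list2: l2.append(word)
  let sim := PySem.Set.len (PySem.Set.inter (PySem.Set.ofList l1) l2)
  sim

-- ===== PORT B =====
-- 'while i < len(a) and a[i] == v: i += 1' from position i onward = dropWhile (== v)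
def pvDropEq (v : String) (l : List String) : List String := l.dropWhile (fun w => w == v)

def pvMergeCount : List String → List String → Int
  | [], _ => 0
  | _ :: _, [] => 0
  | x :: xs, y :: ys =>
    if x < y then pvMergeCount xs (y :: ys)
    else if y < x then pvMergeCount (x :: xs) ys
    else 1 + pvMergeCount (pvDropEq x (x :: xs)) (pvDropEq x (y :: ys))
termination_by a b => a.length + b.length
decreasing_by
  all_goals simp only [List.length_cons]
  all_goals try omega
  have h1 : (pvDropEq x (x :: xs)).length ≤ xs.length := by
    simpa [pvDropEq, List.dropWhile_cons] using List.length_dropWhile_le (fun w => w == x) xs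
  have h2 : (pvDropEq x (y :: ys)).length ≤ (y :: ys).length := List.length_dropWhile_le _ _
  simp only [List.length_cons] at h2
  omega

def get_common_tokens_alt (list1 : List String) (list2 : List String) : Int :=
  pvMergeCount (PySem.List.sorted list1 (fun w => w) false) (PySem.List.sorted list2 (fun w => w) false)

-- ===== PRECONDITION & SPEC =====
def Spec_get_common_tokens (list1 : List String) (list2 : List String) (out : Int) : Prop := out = get_common_tokens_alt list1 list2
instance (list1 : List String) (list2 : List String) (out : Int) : Decidable (Spec_get_common_tokens list1 list2 out) := by unfold Spec_get_common_tokens; infer_instance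

-- ===== CLAIM (what is proved, stated in full; the proofs are below) =====
def Claim_equal_get_common_tokens : Prop := ∀ (list1 : List String) (list2 : List String), Dom_get_common_tokens list1 list2 → Spec_get_common_tokens list1 list2 (get_common_tokens list1 list2)

-- ===== LEMMAS AND PROOFS =====

-- two Nodup lists with the same members have the same length
theorem pv_length_eq_of_mem_iff {l₁ l₂ : List String} (h₁ : l₁.Nodup) (h₂ : l₂.Nodup)
    (h : ∀ z, z ∈ l₁ ↔ z ∈ l₂) : l₁.length = l₂.length :=
  ((List.perm_ext_iff_of_nodup h₁ h₂).2 h).length_eq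

-- on a sorted list whose elements are all ≥ v, dropWhile (== v) removes exactly the copies of v
theorem pv_mem_dropEq {v : String} {l : List String} (hs : l.Pairwise (· ≤ ·))
    (hge : ∀ z ∈ l, v ≤ z) : ∀ z, z ∈ pvDropEq v l ↔ z ∈ l ∧ z ≠ v := by
  induction l with
  | nil => simp [pvDropEq]
  | cons x xs ih =>
    intro z
    by_cases hx : x = v
    · subst hx
      simp only [pvDropEq, List.dropWhile_cons, beq_self_eq_true, if_true]
      rw [show List.dropWhile (fun w => w == x) xs = pvDropEq x xs from rfl,
        ih hs.of_cons (fun z hz => hge z (List.mem_cons_of_mem _ hz))]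
      constructor
      · exact fun ⟨h1, h2⟩ => ⟨List.mem_cons_of_mem _ h1, h2⟩
      · rintro ⟨h1, h2⟩
        rcases List.mem_cons.1 h1 with h | h
        · exact absurd h h2
        · exact ⟨h, h2⟩
    · have hlt : v < x := lt_of_le_of_ne (hge x (List.mem_cons_self)) (Ne.symm hx)
      have : (x == v) = false := beq_false_of_ne hx
      simp only [pvDropEq, List.dropWhile_cons, this, if_neg Bool.false_ne_true]
      constructor
      · intro hz
        refine ⟨hz, ?_⟩
        rcases List.mem_cons.1 hz with h | h
        · subst h; exact hx
        · have := (List.pairwise_cons.1 hs).1 z h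
          exact ne_of_gt (lt_of_lt_of_le hlt this)
      · exact fun ⟨h1, _⟩ => h1

theorem pv_pairwise_dropEq {v : String} {l : List String} (hs : l.Pairwise (· ≤ ·)) :
    (pvDropEq v l).Pairwise (· ≤ ·) :=
  hs.sublist (List.dropWhile_sublist _)

-- the merge walk on two sorted lists counts the distinct common elements
theorem pv_mergeCount_eq (a b : List String) (ha : a.Pairwise (· ≤ ·)) (hb : b.Pairwise (· ≤ ·)) :
    pvMergeCount a b = (((PySem.Set.ofList a).filter (fun z => decide (z ∈ b))).length : Int) := by
  induction a, b using pvMergeCount.induct with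
  | case1 b => simp [pvMergeCount, PySem.Set.ofList_nil]
  | case2 x xs =>
    rw [pvMergeCount]
    simp
  | case3 x xs y ys hlt ih =>
    rw [pvMergeCount, if_pos hlt, ih ha.of_cons hb]
    congr 1
    have hxnb : ¬(x = y ∨ x ∈ ys) := by
      rintro (h | h)
      · exact absurd h (ne_of_lt hlt)
      · exact absurd ((List.pairwise_cons.1 hb).1 x h) (not_le_of_gt hlt)
    apply pv_length_eq_of_mem_iff
    · exact (PySem.Set.nodup_ofList xs).filter _
    · exact (PySem.Set.nodup_ofList (x :: xs)).filter _
    · intro z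
      simp only [List.mem_filter, PySem.Set.mem_ofList, decide_eq_true_eq, List.mem_cons]
      constructor
      · exact fun ⟨h1, h2⟩ => ⟨Or.inr h1, h2⟩
      · rintro ⟨h1 | h1, h2⟩
        · subst h1; exact absurd h2 hxnb
        · exact ⟨h1, h2⟩
  | case4 x xs y ys hnlt hlt ih =>
    rw [pvMergeCount, if_neg hnlt, if_pos hlt, ih ha hb.of_cons]
    congr 1
    apply pv_length_eq_of_mem_iff
    · exact (PySem.Set.nodup_ofList (x :: xs)).filter _
    · exact (PySem.Set.nodup_ofList (x :: xs)).filter _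
    · intro z
      simp only [List.mem_filter, PySem.Set.mem_ofList, decide_eq_true_eq, List.mem_cons]
      have hzy : ∀ z', z' = x ∨ z' ∈ xs → z' ≠ y := by
        intro z' hz'
        have hxz : x ≤ z' := by
          rcases hz' with h | h
          · exact le_of_eq h.symm
          · exact (List.pairwise_cons.1 ha).1 z' h
        exact ne_of_gt (lt_of_lt_of_le hlt hxz)
      constructor
      · exact fun ⟨h1, h2⟩ => ⟨h1, Or.inr h2⟩
      · rintro ⟨h1, h2 | h2⟩
        · exact absurd h2 (hzy z h1)
        · exact ⟨h1, h2⟩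
  | case5 x xs y ys hnlt1 hnlt2 ih =>
    have hxy : x = y := le_antisymm (not_lt.1 hnlt2) (not_lt.1 hnlt1)
    subst hxy
    have hgea : ∀ z ∈ x :: xs, x ≤ z := by
      intro z hz
      rcases List.mem_cons.1 hz with h | h
      · exact le_of_eq h.symm
      · exact (List.pairwise_cons.1 ha).1 z h
    have hgeb : ∀ z ∈ x :: ys, x ≤ z := by
      intro z hz
      rcases List.mem_cons.1 hz with h | h
      · exact le_of_eq h.symm
      · exact (List.pairwise_cons.1 hb).1 z h
    rw [pvMergeCount, if_neg hnlt1, if_neg hnlt2,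
      ih (pv_pairwise_dropEq ha) (pv_pairwise_dropEq hb)]
    have hmem_a := pv_mem_dropEq (l := x :: xs) ha hgea
    have hmem_b := pv_mem_dropEq (l := x :: ys) hb hgeb
    have hlen : ((PySem.Set.ofList (pvDropEq x (x :: xs))).filter
        (fun z => decide (z ∈ pvDropEq x (x :: ys)))).length + 1
        = ((PySem.Set.ofList (x :: xs)).filter (fun z => decide (z ∈ x :: ys))).length := by
      have h1 : (x :: ((PySem.Set.ofList (pvDropEq x (x :: xs))).filter
          (fun z => decide (z ∈ pvDropEq x (x :: ys))))).length
          = ((PySem.Set.ofList (x :: xs)).filter (fun z => decide (z ∈ x :: ys))).length := by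
        apply pv_length_eq_of_mem_iff
        · refine List.nodup_cons.2 ⟨?_, (PySem.Set.nodup_ofList _).filter _⟩
          intro hmem
          have hx := (hmem_b x).1 (of_decide_eq_true (List.mem_filter.1 hmem).2)
          exact hx.2 rfl
        · exact (PySem.Set.nodup_ofList _).filter _
        · intro z
          simp only [List.mem_cons, List.mem_filter, PySem.Set.mem_ofList, decide_eq_true_eq,
            hmem_a z, hmem_b z]
          constructor
          · rintro (rfl | ⟨⟨h1, h2⟩, h3, _⟩)
            · exact ⟨Or.inl rfl, Or.inl rfl⟩
            · exact ⟨h1, h3⟩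
          · rintro ⟨h1, h2⟩
            by_cases hz : z = x
            · exact Or.inl hz
            · exact Or.inr ⟨⟨h1, hz⟩, h2, hz⟩
      simpa [Nat.add_comm] using h1
    omega

-- ===== VERDICT (by name: the statement is the Claim_ definition above) =====
theorem get_common_tokens_spec : Claim_equal_get_common_tokens := by
  intro list1 list2 _
  show get_common_tokens list1 list2 = get_common_tokens_alt list1 list2
  have ha := PySem.List.sorted_pairwise list1 (fun w => w)
  have hb := PySem.List.sorted_pairwise list2 (fun w => w)
  rw [get_common_tokens_alt, pv_mergeCount_eq _ _ ha hb]
  simp only [get_common_tokens, List.map_id', PySem.List.foldl_append_singleton, List.nil_append,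
    PySem.Set.len, PySem.Set.inter]
  congr 1
  apply pv_length_eq_of_mem_iff
  · exact (PySem.Set.nodup_ofList _).filter _
  · exact (PySem.Set.nodup_ofList _).filter _
  · intro z
    simp only [List.mem_filter, PySem.Set.mem_ofList, PySem.List.mem_sorted,
      PySem.Set.contains_iff, decide_eq_true_eq]
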